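-- pv_equiv track=rewrite | github.com/LarryChiem/2025to26Journal | HenngeChallenge/main.py | sum_fourth_powers
-- ===== SOURCE A (Python) =====
-- def sum_fourth_powers(nums, index):
--     # Recursively sum the 4th powers of non-positive values (<= 0).
--     if index == len(nums):
--         return 0
--
--     current = nums[index]
--
--     if current <= 0:
--         return (current**4) + sum_fourth_powers(nums, index + 1)
--     else:  # Positive values are excluded
--         return sum_fourth_powers(nums, index + 1)
-- ===== SOURCE B (Python) =====
-- def sum_fourth_powers(nums, index):
--     # Iterative accumulator instead of recursion.
--     total = 0
--     for i in range(index, len(nums)):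
--         x = nums[i]
--         if x <= 0:
--             total += x ** 4
--     return total
-- ===== Notes on version B (the rewrite author's own statement) =====
-- stated objective: idiomatic
-- what changed: Replaces A's recursion over the index with an iterative range-based loop and an accumulator.
import Mathlib
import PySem

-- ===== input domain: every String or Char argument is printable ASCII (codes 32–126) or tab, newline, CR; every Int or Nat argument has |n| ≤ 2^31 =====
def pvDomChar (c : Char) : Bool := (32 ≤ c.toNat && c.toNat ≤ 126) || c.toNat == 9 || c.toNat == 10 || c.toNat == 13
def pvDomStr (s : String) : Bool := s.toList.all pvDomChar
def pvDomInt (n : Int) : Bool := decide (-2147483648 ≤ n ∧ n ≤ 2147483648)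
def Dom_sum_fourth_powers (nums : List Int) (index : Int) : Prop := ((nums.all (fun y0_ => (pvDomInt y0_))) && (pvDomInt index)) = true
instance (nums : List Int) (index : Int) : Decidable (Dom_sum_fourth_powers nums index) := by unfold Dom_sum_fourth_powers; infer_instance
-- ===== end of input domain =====

-- B replaces A's recursion with an iterative range loop and accumulator (same cost, plainer shape; return-value equivalence only).

-- ===== PORT A =====
-- A's recursion on `index`; the `none` branch of pyGet? is Python's IndexError, excluded by Pre_.
def sum_fourth_powers (nums : List Int) (index : Int) : Int :=
  if index = nums.length then 0
  else
    match h : PySem.List.pyGet? nums index with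
    | none => 0  -- Python raises IndexError here; outside Pre_
    | some current =>
      if current ≤ 0 then current ^ 4 + sum_fourth_powers nums (index + 1)
      else sum_fourth_powers nums (index + 1)
termination_by (nums.length + 1 - index).toNat
decreasing_by
  all_goals
    have hin : PySem.Raise.InRange nums.length index := by
      by_contra hc
      simp [(PySem.List.pyGet?_eq_none_iff nums index).mpr hc] at h
    unfold PySem.Raise.InRange at hin
    omega

-- ===== PORT B =====
-- Source B: total = 0; for i in range(index, len(nums)): x = nums[i]; if x <= 0: total += x**4
def sum_fourth_powers_alt (nums : List Int) (index : Int) : Int :=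
  (PySem.List.pyRange index nums.length 1).foldl
    (fun total i =>
      match PySem.List.pyGet? nums i with
      | some x => if x ≤ 0 then total + x ^ 4 else total
      | none => total)  -- Python raises IndexError here; outside Pre_
    0

-- ===== PRECONDITION & SPEC =====
-- Pre_ excludes exactly the inputs where A raises IndexError: index > len(nums) (first call, nums[index])
-- or index < -len(nums) (negative index out of range).
def Pre_sum_fourth_powers (nums : List Int) (index : Int) : Prop :=
  -(nums.length : Int) ≤ index ∧ index ≤ nums.length
instance (nums : List Int) (index : Int) : Decidable (Pre_sum_fourth_powers nums index) := by
  unfold Pre_sum_fourth_powers; infer_instance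

def pvWitness_sum_fourth_powers : List Int × Int := ([-2, 3, -1, 0], 1)

def Spec_sum_fourth_powers (nums : List Int) (index : Int) (out : Int) : Prop :=
  out = sum_fourth_powers_alt nums index
instance (nums : List Int) (index : Int) (out : Int) : Decidable (Spec_sum_fourth_powers nums index out) := by
  unfold Spec_sum_fourth_powers; infer_instance

-- ===== CLAIM (what is proved, stated in full; the proofs are below) =====
def Claim_equal_sum_fourth_powers : Prop := ∀ (nums : List Int) (index : Int), Dom_sum_fourth_powers nums index → Pre_sum_fourth_powers nums index → Spec_sum_fourth_powers nums index (sum_fourth_powers nums index)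


-- ===== LEMMAS AND PROOFS =====

-- Pull the accumulator out of B's fold step.
lemma pv_foldl_acc (f : Int → Int → Int) (h : ∀ a i, f a i = a + f 0 i) :
    ∀ (l : List Int) (a : Int), l.foldl f a = a + l.foldl f 0 := by
  intro l
  induction l with
  | nil => intro a; simp
  | cons i l ih =>
    intro a
    simp only [List.foldl_cons]
    rw [ih (f a i), ih (f 0 i), h a i]
    ring

lemma pv_step_acc (nums : List Int) :
    ∀ (a i : Int),
      (fun total i =>
        match PySem.List.pyGet? nums i with
        | some x => if x ≤ 0 then total + x ^ 4 else total
        | none => total) a i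
      = a + (fun total i =>
        match PySem.List.pyGet? nums i with
        | some x => if x ≤ 0 then total + x ^ 4 else total
        | none => total) 0 i := by
  intro a i
  rcases h : PySem.List.pyGet? nums i with _ | x
  · simp [h]
  · by_cases hx : x ≤ 0 <;> simp [h, hx] <;> ring

-- A's recursion equals B's fold, for every in-range starting index.
lemma pv_main (nums : List Int) :
    ∀ (n : ℕ) (index : Int), (nums.length + 1 - index).toNat = n →
      -(nums.length : Int) ≤ index → index ≤ nums.length →
      sum_fourth_powers nums index = sum_fourth_powers_alt nums index := by
  intro n
  induction n with
  | zero =>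
    intro index hn hlo hhi
    omega
  | succ n ih =>
    intro index hn hlo hhi
    by_cases hend : index = nums.length
    · subst hend
      rw [sum_fourth_powers]
      simp [sum_fourth_powers_alt, PySem.List.pyRange_one_eq_nil (le_refl _)]
    · have hlt : index < nums.length := lt_of_le_of_ne hhi hend
      have hget : ∃ x, PySem.List.pyGet? nums index = some x := by
        rcases h : PySem.List.pyGet? nums index with _ | x
        · exfalso
          have := (PySem.List.pyGet?_eq_none_iff nums index).mp h
          exact this ⟨hlo, hlt⟩
        · exact ⟨x, rfl⟩
      rcases hget with ⟨x, hx⟩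
      have hrec : sum_fourth_powers nums index =
          (if x ≤ 0 then x ^ 4 + sum_fourth_powers nums (index + 1)
           else sum_fourth_powers nums (index + 1)) := by
        rw [sum_fourth_powers]
        rw [if_neg hend]
        split
        · next heq => rw [hx] at heq; cases heq
        · next y heq => rw [hx] at heq; injection heq with h; subst h; rfl
      have halt : sum_fourth_powers_alt nums index =
          (if x ≤ 0 then x ^ 4 else 0) + sum_fourth_powers_alt nums (index + 1) := by
        unfold sum_fourth_powers_alt
        rw [PySem.List.pyRange_one_cons hlt, List.foldl_cons,
            pv_foldl_acc _ (pv_step_acc nums)]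
        simp only [hx]
        by_cases hxle : x ≤ 0 <;> simp [hxle]
      have hih := ih (index + 1) (by omega) (by omega) (by omega)
      rw [hrec, halt, hih]
      by_cases hxle : x ≤ 0 <;> simp [hxle]

-- ===== VERDICT (by name: the statement is the Claim_ definition above) =====
theorem sum_fourth_powers_spec : Claim_equal_sum_fourth_powers := by
  intro nums index _ hpre
  exact pv_main nums _ index rfl hpre.1 hpre.2
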